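-- pv_equiv track=rewrite | github.com/carlosbionic/Interview-Problems | Paper Cut into Minimum Number of Squares/papercut.py | rectCarlos
-- ===== SOURCE A (Python) =====
-- def rectCarlos(a,b):
--
-- 	# Save the maximum in a
-- 	if a < b: a, b = b, a
--
-- 	result = 0
--
-- 	while b > 0:
--
-- 		result += int(a/b)
-- 		large = a
-- 		a = b
-- 		b = (large%b)
--
-- 	return result
-- ===== SOURCE B (Python) =====
-- def rectCarlos(a, b):
--     # Recursive Euclid: when a < b the first quotient is 0 and a % b == a,
--     # so the recursion swaps the arguments naturally; no explicit swap needed.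
--     if a <= 0 or b <= 0:
--         return 0
--     return a // b + rectCarlos(b, a % b)
-- ===== Notes on version B (the rewrite author's own statement) =====
-- stated objective: simpler
-- what changed: Replaces the explicit swap plus while-loop accumulator with a direct recursive Euclid formulation (quotient plus recursion on (b, a mod b)); the a<b swap disappears because a//b = 0 and a%b = a then swap naturally.
import Mathlib
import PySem

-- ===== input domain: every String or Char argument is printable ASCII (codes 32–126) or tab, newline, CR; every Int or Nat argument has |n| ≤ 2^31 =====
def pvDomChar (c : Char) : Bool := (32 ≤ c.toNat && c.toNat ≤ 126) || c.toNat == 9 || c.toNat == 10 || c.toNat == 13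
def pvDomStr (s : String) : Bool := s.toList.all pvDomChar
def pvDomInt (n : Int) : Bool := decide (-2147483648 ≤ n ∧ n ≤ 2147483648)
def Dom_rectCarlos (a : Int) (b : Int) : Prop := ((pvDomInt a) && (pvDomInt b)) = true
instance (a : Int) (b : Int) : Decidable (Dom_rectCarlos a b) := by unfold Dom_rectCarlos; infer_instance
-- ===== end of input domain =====

-- B replaces A's explicit swap + while-loop accumulator by a direct recursive Euclid
-- (quotient + recursion on (b, a mod b)); objective: simpler.


-- ===== PORT A =====
-- A's while loop, as structural recursion on the loop state (a, b, result).
-- A's `int(a/b)` is float truncation toward zero; the loop only runs with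
-- 0 < b ≤ a (after the swap) and |a|,|b| ≤ 2^31, where it equals floor division
-- exactly, so it is ported as PySem.Int.floordiv.
def rectCarlosLoop (a : Int) (b : Int) (result : Int) : Int :=
  if _h : 0 < b then
    rectCarlosLoop b (PySem.Int.mod a b) (result + PySem.Int.floordiv a b)
  else result
termination_by b.toNat
decreasing_by
  have _h1 : 0 ≤ PySem.Int.mod a b := by
    rw [PySem.Int.mod_eq_emod_of_pos _h]; exact Int.emod_nonneg a (by omega)
  have h2 : PySem.Int.mod a b < b := by
    rw [PySem.Int.mod_eq_emod_of_pos _h]; exact Int.emod_lt_of_pos a _h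
  omega

def rectCarlos (a : Int) (b : Int) : Int :=
  if a < b then rectCarlosLoop b a 0 else rectCarlosLoop a b 0

-- ===== PORT B =====
def rectCarlos_alt (a : Int) (b : Int) : Int :=
  if _h : a ≤ 0 ∨ b ≤ 0 then 0
  else PySem.Int.floordiv a b + rectCarlos_alt b (PySem.Int.mod a b)
termination_by b.toNat
decreasing_by
  have hb : 0 < b := by omega
  have _h1 : 0 ≤ PySem.Int.mod a b := by
    rw [PySem.Int.mod_eq_emod_of_pos hb]; exact Int.emod_nonneg a (by omega)
  have h2 : PySem.Int.mod a b < b := by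
    rw [PySem.Int.mod_eq_emod_of_pos hb]; exact Int.emod_lt_of_pos a hb
  omega

-- ===== PRECONDITION & SPEC =====
def Spec_rectCarlos (a : Int) (b : Int) (out : Int) : Prop := out = rectCarlos_alt a b
instance (a : Int) (b : Int) (out : Int) : Decidable (Spec_rectCarlos a b out) := by unfold Spec_rectCarlos; infer_instance

-- ===== CLAIM (what is proved, stated in full; the proofs are below) =====
def Claim_equal_rectCarlos : Prop := ∀ (a : Int) (b : Int), Dom_rectCarlos a b → Spec_rectCarlos a b (rectCarlos a b)

-- ===== LEMMAS AND PROOFS =====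

-- loop ≡ recursion, for positive first argument (the only way A reaches the loop body)
theorem rectCarlosLoop_eq_aux : ∀ (n : Nat) (b a r : Int), b.toNat ≤ n → 0 < a →
    rectCarlosLoop a b r = r + rectCarlos_alt a b := by
  intro n
  induction n with
  | zero =>
    intro b a r hn _
    have hb : ¬ 0 < b := by omega
    rw [rectCarlosLoop, dif_neg hb, rectCarlos_alt, dif_pos (Or.inr (by omega))]
    ring
  | succ n ih =>
  intro b a r hn ha
  by_cases hb : 0 < b
  · have _h1 : 0 ≤ PySem.Int.mod a b := by
      rw [PySem.Int.mod_eq_emod_of_pos hb]; exact Int.emod_nonneg a (by omega)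
    have h2 : PySem.Int.mod a b < b := by
      rw [PySem.Int.mod_eq_emod_of_pos hb]; exact Int.emod_lt_of_pos a hb
    rw [rectCarlosLoop, dif_pos hb, rectCarlos_alt, dif_neg (by omega)]
    by_cases hm : 0 < PySem.Int.mod a b
    · rw [ih (PySem.Int.mod a b) b _ (by omega) hb]
      ring
    · have hm0 : PySem.Int.mod a b = 0 := by omega
      rw [hm0, rectCarlosLoop, dif_neg (by omega), rectCarlos_alt, dif_pos (Or.inr le_rfl)]
      ring
  · rw [rectCarlosLoop, dif_neg hb, rectCarlos_alt, dif_pos (Or.inr (by omega))]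
    ring

theorem rectCarlosLoop_eq (b a r : Int) (ha : 0 < a) :
    rectCarlosLoop a b r = r + rectCarlos_alt a b :=
  rectCarlosLoop_eq_aux b.toNat b a r le_rfl ha

theorem floordiv_zero_of_lt {a b : Int} (ha : 0 < a) (hab : a < b) :
    PySem.Int.floordiv a b = 0 := by
  rw [PySem.Int.floordiv_eq_ediv_of_pos (by omega)]
  exact Int.ediv_eq_zero_of_lt (by omega) hab

theorem mod_self_of_lt {a b : Int} (ha : 0 < a) (hab : a < b) :
    PySem.Int.mod a b = a := by
  rw [PySem.Int.mod_eq_emod_of_pos (by omega)]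
  exact Int.emod_eq_of_lt (by omega) hab

-- ===== VERDICT (by name: the statement is the Claim_ definition above) =====
theorem rectCarlos_spec : Claim_equal_rectCarlos := by
  intro a b _
  unfold Spec_rectCarlos rectCarlos
  by_cases hab : a < b
  · rw [if_pos hab]
    by_cases ha : 0 < a
    · -- 0 < a < b: loop b a 0 = alt b a, and alt a b unrolls once into alt b a
      rw [rectCarlosLoop_eq a b 0 (by omega)]
      have h : rectCarlos_alt a b = rectCarlos_alt b a := by
        conv_lhs => rw [rectCarlos_alt]
        rw [dif_neg (by omega), floordiv_zero_of_lt ha hab, mod_self_of_lt ha hab]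
        ring
      rw [h]; ring
    · -- a ≤ 0: loop b a 0 stops at once (its b-state is a ≤ 0); alt a b = 0
      rw [rectCarlosLoop, dif_neg (by omega), rectCarlos_alt, dif_pos (Or.inl (by omega))]
  · rw [if_neg hab]
    by_cases ha : 0 < a
    · exact (rectCarlosLoop_eq b a 0 ha).trans (by ring)
    · -- b ≤ a ≤ 0: loop stops at once; alt = 0
      rw [rectCarlosLoop, dif_neg (by omega), rectCarlos_alt, dif_pos (Or.inl (by omega))]
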